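-- pv_equiv track=rewrite | github.com/vampireisoves/drpy-node-me | scripts/python/音乐.py | isVideoFormat
-- ===== SOURCE A (Python) =====
-- def isVideoFormat(url: str) -> bool:
--     if not url:
--         return False
--
--     url_lower = url.lower()
--     video_formats = [
--         '.mp4', '.m3u8', '.flv', '.avi', '.mkv',
--         '.mov', '.wmv', '.mpg', '.mpeg', '.ts',
--         '.m4v', '.webm', '.3gp', '.mp3', '.wav',
--         '.flac', '.aac', '.ogg', '.wma', '.m4a'
--     ]
--
--     for fmt in video_formats:
--         if fmt in url_lower:
--             return True
--
--     if any(keyword in url_lower for keyword in ['m3u8', 'stream', 'live', 'playlist', 'download']):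
--         return True
--
--     return False
-- ===== SOURCE B (Python) =====
-- _KEYWORDS = [
--     '.mp4', '.m3u8', '.flv', '.avi', '.mkv',
--     '.mov', '.wmv', '.mpg', '.mpeg', '.ts',
--     '.m4v', '.webm', '.3gp', '.mp3', '.wav',
--     '.flac', '.aac', '.ogg', '.wma', '.m4a',
--     'm3u8', 'stream', 'live', 'playlist', 'download',
-- ]
--
--
-- def isVideoFormat(url: str) -> bool:
--     s = url.lower()
--     for i in range(len(s)):
--         if any(s.startswith(k, i) for k in _KEYWORDS):
--             return True
--     return False
-- ===== Notes on version B (the rewrite author's own statement) =====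
-- stated objective: alternative
-- what changed: Replaces A's ~25 separate substring-membership passes (early-return loop plus an any over a second keyword list) by a single left-to-right scan over positions of the lowered url that tests startswith for each of the 25 merged keywords at each position.
import Mathlib
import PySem

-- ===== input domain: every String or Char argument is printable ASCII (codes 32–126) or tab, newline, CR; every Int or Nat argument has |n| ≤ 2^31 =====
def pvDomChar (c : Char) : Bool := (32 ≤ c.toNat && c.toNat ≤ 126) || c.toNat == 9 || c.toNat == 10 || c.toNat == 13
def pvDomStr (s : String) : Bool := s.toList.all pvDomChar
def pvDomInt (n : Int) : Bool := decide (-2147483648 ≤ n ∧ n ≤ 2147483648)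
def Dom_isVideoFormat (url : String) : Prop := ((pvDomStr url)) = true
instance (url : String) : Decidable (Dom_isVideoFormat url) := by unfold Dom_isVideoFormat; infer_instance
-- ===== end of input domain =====

-- B replaces A's ~25 separate substring-membership passes by a single left-to-right
-- positional scan testing startswith for each merged keyword (alternative traversal, same cost).


-- ===== PORT A =====
def pvFormats : List String :=
  [".mp4", ".m3u8", ".flv", ".avi", ".mkv",
   ".mov", ".wmv", ".mpg", ".mpeg", ".ts",
   ".m4v", ".webm", ".3gp", ".mp3", ".wav",
   ".flac", ".aac", ".ogg", ".wma", ".m4a"]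

def pvKeywords : List String := ["m3u8", "stream", "live", "playlist", "download"]

def isVideoFormat (url : String) : Bool :=
  if url == "" then false
  else
    let url_lower := PySem.Str.lower url
    -- the 'for fmt in video_formats: if fmt in url_lower: return True' loop
    if pvFormats.any (fun fmt => PySem.Str.isIn fmt url_lower) then true
    else if pvKeywords.any (fun k => PySem.Str.isIn k url_lower) then true
    else false

-- ===== PORT B =====
def pvAllKw : List (List Char) :=
  [".mp4".toList, ".m3u8".toList, ".flv".toList, ".avi".toList, ".mkv".toList,
   ".mov".toList, ".wmv".toList, ".mpg".toList, ".mpeg".toList, ".ts".toList,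
   ".m4v".toList, ".webm".toList, ".3gp".toList, ".mp3".toList, ".wav".toList,
   ".flac".toList, ".aac".toList, ".ogg".toList, ".wma".toList, ".m4a".toList,
   "m3u8".toList, "stream".toList, "live".toList, "playlist".toList, "download".toList]

-- the 'for i in range(len(s)):' loop: recursion over suffixes = scan over positions
def pvScan : List Char → Bool
  | [] => false
  | c :: rest =>
    if pvAllKw.any (fun k => PySem.Chars.startswith (c :: rest) k) then true
    else pvScan rest

def isVideoFormat_alt (url : String) : Bool :=
  pvScan (PySem.Chars.lower url.toList)

-- ===== PRECONDITION & SPEC =====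
def Spec_isVideoFormat (url : String) (out : Bool) : Prop := out = isVideoFormat_alt url
instance (url : String) (out : Bool) : Decidable (Spec_isVideoFormat url out) := by unfold Spec_isVideoFormat; infer_instance

-- ===== CLAIM (what is proved, stated in full; the proofs are below) =====
def Claim_equal_isVideoFormat : Prop := ∀ (url : String), Dom_isVideoFormat url → Spec_isVideoFormat url (isVideoFormat url)

-- ===== LEMMAS AND PROOFS =====

theorem pvIsIn_cons (k : List Char) (c : Char) (rest : List Char) :
    PySem.Chars.isIn k (c :: rest)
      = (PySem.Chars.startswith (c :: rest) k || PySem.Chars.isIn k rest) := by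
  rw [Bool.eq_iff_iff]
  simp [PySem.Chars.isIn_iff_infix, PySem.Chars.startswith_iff, List.infix_cons_iff]

theorem pvScan_eq (s : List Char) :
    pvScan s = pvAllKw.any (fun k => PySem.Chars.isIn k s) := by
  induction s with
  | nil => decide
  | cons c rest ih =>
    show (if pvAllKw.any (fun k => PySem.Chars.startswith (c :: rest) k) then true
          else pvScan rest) = _
    rw [ih]
    simp only [Bool.if_true_left]
    rw [show (pvAllKw.any fun k => PySem.Chars.isIn k (c :: rest))
          = pvAllKw.any (fun k => PySem.Chars.startswith (c :: rest) k || PySem.Chars.isIn k rest)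
        from PySem.List.any_congr_mem (fun k _ => pvIsIn_cons k c rest)]
    rw [show ∀ (l : List (List Char)) (p q : List Char → Bool),
          (l.any fun k => p k || q k) = (l.any p || l.any q)
        from fun l p q => by rw [Bool.eq_iff_iff]; simp [List.any_eq_true]; aesop]
    simp only [Bool.decide_eq_true]

-- ===== VERDICT (by name: the statement is the Claim_ definition above) =====
theorem isVideoFormat_spec : Claim_equal_isVideoFormat := by
  intro url _
  show isVideoFormat url = isVideoFormat_alt url
  unfold isVideoFormat isVideoFormat_alt
  rw [pvScan_eq]
  by_cases h : url = ""
  · subst h; decide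
  · rw [if_neg (by simpa using h)]
    simp only [pvFormats, pvKeywords, pvAllKw, List.any_cons, List.any_nil,
      PySem.Str.isIn_eq, PySem.Str.toList_lower, Bool.if_true_left, Bool.if_false_right,
      Bool.or_false, Bool.and_true, Bool.decide_eq_true, Bool.or_assoc]
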